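-- pv_equiv track=rewrite | github.com/seduceIDS/seduce | agent/behavour/pipeline/process_pipe.py | combine_preds
-- ===== SOURCE A (Python) =====
-- def combine_preds(X, y_preds_1, idxs_1, y_preds_0, idxs_0):
--     """Combine both malicious and other preds."""
--     final_preds = []
--     for i in range(len(X)):
--         if i in idxs_1:
--             index = idxs_1.index(i)
--             final_preds.append(y_preds_1[index])
--         elif i in idxs_0:
--             index = idxs_0.index(i)
--             final_preds.append(y_preds_0[index])
--     return final_preds
-- ===== SOURCE B (Python) =====
-- def combine_preds(X, y_preds_1, idxs_1, y_preds_0, idxs_0):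
--     """Combine both malicious and other preds."""
--     d = {}
--     for k, p in zip(idxs_1, y_preds_1):
--         if k not in d:
--             d[k] = p
--     for k, p in zip(idxs_0, y_preds_0):
--         if k not in d:
--             d[k] = p
--     return [d[k] for k in sorted(k for k in d if 0 <= k < len(X))]
-- ===== Notes on version B (the rewrite author's own statement) =====
-- stated objective: faster
-- what changed: Replaces A's per-position scan (membership test plus list.index over both index lists for every i in range(len(X))) with a single index->prediction dict built once from the two zipped lists (first occurrence wins, idxs_1 first) and one sorted emission of the in-range keys.
import Mathlib
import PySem

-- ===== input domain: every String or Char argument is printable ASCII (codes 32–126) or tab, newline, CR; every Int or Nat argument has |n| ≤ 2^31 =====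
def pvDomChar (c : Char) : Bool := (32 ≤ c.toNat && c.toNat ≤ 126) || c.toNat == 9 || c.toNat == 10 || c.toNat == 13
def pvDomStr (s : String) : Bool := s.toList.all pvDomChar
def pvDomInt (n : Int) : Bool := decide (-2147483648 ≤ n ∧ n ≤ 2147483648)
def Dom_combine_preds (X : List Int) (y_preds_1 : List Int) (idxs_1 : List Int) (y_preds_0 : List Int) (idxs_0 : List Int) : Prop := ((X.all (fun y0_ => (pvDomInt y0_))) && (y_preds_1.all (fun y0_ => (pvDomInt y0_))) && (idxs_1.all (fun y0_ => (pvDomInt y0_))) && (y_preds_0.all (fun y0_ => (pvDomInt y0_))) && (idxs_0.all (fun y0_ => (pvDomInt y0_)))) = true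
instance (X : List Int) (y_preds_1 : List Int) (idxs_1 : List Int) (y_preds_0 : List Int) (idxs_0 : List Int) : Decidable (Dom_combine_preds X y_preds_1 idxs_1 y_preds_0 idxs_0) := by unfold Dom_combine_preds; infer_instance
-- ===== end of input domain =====

-- B replaces A's per-position scan of both index lists with one index->prediction
-- dictionary (first occurrence wins, idxs_1 first) and a sorted emission of the
-- in-range keys; equal output wherever A returns (Pre_ excludes A's IndexError inputs).


-- ===== PORT A =====
-- for i in range(len(X)): if i in idxs_1: append y_preds_1[idxs_1.index(i)]
--                         elif i in idxs_0: append y_preds_0[idxs_0.index(i)]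
-- Where the Python raises IndexError (pyGet? = none; excluded by Pre_) the fold keeps acc.
def combine_preds (X : List Int) (y_preds_1 : List Int) (idxs_1 : List Int) (y_preds_0 : List Int) (idxs_0 : List Int) : List Int :=
  (List.range X.length).foldl (fun acc (i : Nat) =>
    if (i : Int) ∈ idxs_1 then
      match PySem.List.index? idxs_1 (i : Int) with
      | some ix =>
        match PySem.List.pyGet? y_preds_1 (ix : Int) with
        | some v => acc ++ [v]
        | none => acc
      | none => acc
    else if (i : Int) ∈ idxs_0 then
      match PySem.List.index? idxs_0 (i : Int) with
      | some ix =>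
        match PySem.List.pyGet? y_preds_0 (ix : Int) with
        | some v => acc ++ [v]
        | none => acc
      | none => acc
    else acc) []

-- ===== PORT B =====
-- insert-if-absent loop over a zipped (index, pred) list
def pvInsAbsent (pairs : List (Int × Int)) (d : PySem.Dict Int Int) : PySem.Dict Int Int :=
  pairs.foldl (fun d p => if d.contains p.1 then d else d.insert p.1 p.2) d

def combine_preds_alt (X : List Int) (y_preds_1 : List Int) (idxs_1 : List Int) (y_preds_0 : List Int) (idxs_0 : List Int) : List Int :=
  let d := pvInsAbsent (idxs_0.zip y_preds_0) (pvInsAbsent (idxs_1.zip y_preds_1) PySem.Dict.empty)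
  let ks := PySem.List.sorted ((PySem.Dict.keys d).filter (fun k => decide (0 ≤ k ∧ k < (X.length : Int)))) (fun k => k) false
  ks.map (fun k => PySem.Dict.getD d k 0)

-- ===== PRECONDITION & SPEC =====
-- Pre_ excludes exactly the inputs on which A raises IndexError: some position
-- i < len(X) occurs in an index list at a first position beyond its preds list.
def Pre_combine_preds (X : List Int) (y_preds_1 : List Int) (idxs_1 : List Int) (y_preds_0 : List Int) (idxs_0 : List Int) : Prop :=
  ∀ i ∈ List.range X.length,
    ((i : Int) ∈ idxs_1 → idxs_1.idxOf (i : Int) < y_preds_1.length) ∧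
    ((i : Int) ∉ idxs_1 → (i : Int) ∈ idxs_0 → idxs_0.idxOf (i : Int) < y_preds_0.length)
instance (X : List Int) (y_preds_1 : List Int) (idxs_1 : List Int) (y_preds_0 : List Int) (idxs_0 : List Int) : Decidable (Pre_combine_preds X y_preds_1 idxs_1 y_preds_0 idxs_0) := by unfold Pre_combine_preds; infer_instance

def pvWitness_combine_preds : List Int × List Int × List Int × List Int × List Int :=
  ([7, 8, 9], [10, 11], [2, 0], [20], [1])

def Spec_combine_preds (X : List Int) (y_preds_1 : List Int) (idxs_1 : List Int) (y_preds_0 : List Int) (idxs_0 : List Int) (out : List Int) : Prop := out = combine_preds_alt X y_preds_1 idxs_1 y_preds_0 idxs_0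
instance (X : List Int) (y_preds_1 : List Int) (idxs_1 : List Int) (y_preds_0 : List Int) (idxs_0 : List Int) (out : List Int) : Decidable (Spec_combine_preds X y_preds_1 idxs_1 y_preds_0 idxs_0 out) := by unfold Spec_combine_preds; infer_instance

-- ===== CLAIM (what is proved, stated in full; the proofs are below) =====
def Claim_equal_combine_preds : Prop := ∀ (X : List Int) (y_preds_1 : List Int) (idxs_1 : List Int) (y_preds_0 : List Int) (idxs_0 : List Int), Dom_combine_preds X y_preds_1 idxs_1 y_preds_0 idxs_0 → Pre_combine_preds X y_preds_1 idxs_1 y_preds_0 idxs_0 → Spec_combine_preds X y_preds_1 idxs_1 y_preds_0 idxs_0 (combine_preds X y_preds_1 idxs_1 y_preds_0 idxs_0)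

-- ===== LEMMAS AND PROOFS =====

-- lookup through the insert-if-absent fold: old entries win, new ones come from List.lookup
theorem pvInsAbsent_get? (pairs : List (Int × Int)) (d : PySem.Dict Int Int) (k : Int) :
    (pvInsAbsent pairs d).get? k = ((d.get? k).orElse (fun _ => pairs.lookup k)) := by
  induction pairs generalizing d with
  | nil => simp [pvInsAbsent]
  | cons p t ih =>
    simp only [pvInsAbsent, List.foldl_cons] at ih ⊢
    by_cases hc : d.contains p.1 = true
    · rw [if_pos hc, ih]
      cases hget : d.get? k with
      | some v => simp [Option.orElse]
      | none =>
        have hk : (k == p.1) = false := by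
          rw [PySem.Dict.contains_eq_isSome_get?] at hc
          by_contra h
          rw [show k = p.1 from by simpa using h] at hget
          rw [hget] at hc; simp at hc
        simp [Option.orElse, List.lookup, hk]
    · rw [if_neg hc, ih, PySem.Dict.get?_insert]
      by_cases hk : k = p.1
      · have hge : d.get? k = none := by
          rw [PySem.Dict.contains_eq_isSome_get?] at hc
          rw [hk]
          cases h : d.get? p.1 with
          | none => rfl
          | some v => rw [h] at hc; simp at hc
        rw [hk] at hge
        simp [hk, hge, Option.orElse, List.lookup]
      · simp only [if_neg hk]
        have hkb : (k == p.1) = false := by simp [hk]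
        cases hget : d.get? k <;> simp [Option.orElse, List.lookup, hkb]

theorem pvInsAbsent_nodup_keys (pairs : List (Int × Int)) (d : PySem.Dict Int Int)
    (h : d.keys.Nodup) : (pvInsAbsent pairs d).keys.Nodup := by
  induction pairs generalizing d with
  | nil => simpa [pvInsAbsent]
  | cons p t ih =>
    simp only [pvInsAbsent, List.foldl_cons]
    by_cases hc : d.contains p.1 = true
    · rw [if_pos hc]; exact ih d h
    · rw [if_neg hc]; exact ih _ (PySem.Dict.nodup_keys_insert d p.1 p.2 h)

-- idxOf? on a member is some idxOf
theorem idxOf?_of_mem (xs : List Int) (k : Int) (h : k ∈ xs) :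
    List.idxOf? k xs = some (xs.idxOf k) := by
  cases h' : List.idxOf? k xs with
  | none => exact absurd (List.idxOf?_eq_none_iff.mp h') (by simpa using h)
  | some j => rw [List.idxOf_eq_getD_idxOf?, h']; rfl

-- lookup in zip(keys, vals) = first-occurrence indexing
theorem zip_lookup (keys vals : List Int) (k : Int) :
    (keys.zip vals).lookup k = if k ∈ keys then vals[keys.idxOf k]? else none := by
  induction keys generalizing vals with
  | nil => simp
  | cons a t ih =>
    cases vals with
    | nil =>
      simp only [List.zip_nil_right, List.lookup_nil]
      split <;> simp
    | cons v vs =>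
      by_cases hk : a = k
      · subst hk
        simp [List.idxOf_cons_self]
      · simp only [List.zip_cons_cons, List.lookup, ih vs]
        rw [List.idxOf_cons_ne _ (by simpa using hk)]
        have hka : (k == a) = false := by simp [Ne.symm hk]
        by_cases hm : k ∈ t
        · simp [hm, hka]
        · simp [hm, hka]
          intro h
          exact (hk h.symm).elim

theorem combine_preds_spec_aux (X : List Int) (y_preds_1 : List Int) (idxs_1 : List Int)
    (y_preds_0 : List Int) (idxs_0 : List Int)
    (hpre : Pre_combine_preds X y_preds_1 idxs_1 y_preds_0 idxs_0) :
    combine_preds X y_preds_1 idxs_1 y_preds_0 idxs_0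
      = combine_preds_alt X y_preds_1 idxs_1 y_preds_0 idxs_0 := by
  -- the full dictionary and its lookup characterisation
  set d := pvInsAbsent (idxs_0.zip y_preds_0) (pvInsAbsent (idxs_1.zip y_preds_1) PySem.Dict.empty) with hd
  have hget : ∀ k : Int, d.get? k =
      (((idxs_1.zip y_preds_1).lookup k).orElse (fun _ => (idxs_0.zip y_preds_0).lookup k)) := by
    intro k
    rw [hd, pvInsAbsent_get?, pvInsAbsent_get?]
    simp [Option.orElse]
  have hnd : d.keys.Nodup := by
    rw [hd]
    exact pvInsAbsent_nodup_keys _ _ (pvInsAbsent_nodup_keys _ _ (by simp [PySem.Dict.keys, PySem.Dict.empty]))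
  -- Step 1: A's fold body equals the dictionary-lookup body on range(len X)
  have hA : combine_preds X y_preds_1 idxs_1 y_preds_0 idxs_0
      = (List.range X.length).foldl (fun acc (i : Nat) =>
          if (d.get? (i : Int)).isSome then acc ++ [(d.get? (i : Int)).getD 0] else acc) [] := by
    unfold combine_preds
    apply PySem.List.foldl_congr_mem
    intro acc i hi
    rw [List.mem_range] at hi
    have hp := hpre i (List.mem_range.mpr hi)
    by_cases h1 : (i : Int) ∈ idxs_1
    · have hlt : idxs_1.idxOf (i : Int) < y_preds_1.length := hp.1 h1
      have hidx : PySem.List.index? idxs_1 (i : Int) = some (idxs_1.idxOf (i : Int)) := by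
        rw [PySem.List.index?_eq_idxOf?, idxOf?_of_mem _ _ h1]
      have hv : d.get? (i : Int) = some (y_preds_1[idxs_1.idxOf (i : Int)]'
          (lt_of_lt_of_le hlt (le_refl _))) := by
        rw [hget, zip_lookup, if_pos h1, List.getElem?_eq_getElem hlt]
        simp [Option.orElse]
      simp only [if_pos h1, hidx, PySem.List.pyGet?_natCast, List.getElem?_eq_getElem hlt, hv]
      simp
    · by_cases h0 : (i : Int) ∈ idxs_0
      · have hlt : idxs_0.idxOf (i : Int) < y_preds_0.length := hp.2 h1 h0
        have hv : d.get? (i : Int) = some (y_preds_0[idxs_0.idxOf (i : Int)]'hlt) := by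
          rw [hget, zip_lookup, if_neg h1, zip_lookup, if_pos h0, List.getElem?_eq_getElem hlt]
          simp [Option.orElse]
        have hidx : PySem.List.index? idxs_0 (i : Int) = some (idxs_0.idxOf (i : Int)) := by
          rw [PySem.List.index?_eq_idxOf?, idxOf?_of_mem _ _ h0]
        simp only [if_neg h1, if_pos h0, hidx, PySem.List.pyGet?_natCast,
          List.getElem?_eq_getElem hlt, hv]
        simp
      · have hv : d.get? (i : Int) = none := by
          rw [hget, zip_lookup, if_neg h1, zip_lookup, if_neg h0]
          simp [Option.orElse]
        simp [if_neg h1, if_neg h0, hv]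
  -- Step 2: B's sorted key list is the filtered range
  have hkeys : PySem.List.sorted ((PySem.Dict.keys d).filter (fun k => decide (0 ≤ k ∧ k < (X.length : Int)))) (fun k => k) false
      = ((List.range X.length).filter (fun (i : Nat) => d.contains (i : Int))).map (fun (i : Nat) => (i : Int)) := by
    apply PySem.List.eq_of_perm_of_pairwise_le_of_injective (fun k => k) (fun _ _ h => h)
    · -- permutation: both nodup with the same membership
      refine (PySem.List.sorted_perm _ _ _).trans ?_
      rw [List.perm_ext_iff_of_nodup (hnd.filter _)
        (((List.nodup_range).filter _).map (fun a b => by exact_mod_cast id))]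
      intro k
      simp only [List.mem_filter, List.mem_map, List.mem_range, decide_eq_true_eq]
      constructor
      · rintro ⟨hk, h0, hlen⟩
        refine ⟨k.toNat, ⟨by omega, ?_⟩, by omega⟩
        rw [show ((k.toNat : Int)) = k by omega]
        exact (PySem.Dict.contains_iff_mem_keys d k).mpr hk
      · rintro ⟨i, ⟨hi, hc⟩, rfl⟩
        exact ⟨(PySem.Dict.contains_iff_mem_keys d _).mp hc, by omega, by exact_mod_cast hi⟩
    · -- sorted output is pairwise ≤
      exact PySem.List.sorted_pairwise _ _
    · -- the filtered range cast to Int is pairwise ≤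
      refine List.Pairwise.map _ (fun a b h => ?_) (List.Pairwise.sublist List.filter_sublist List.pairwise_lt_range)
      exact_mod_cast le_of_lt h
  -- Finish: both sides are the same map over the same filtered range
  rw [hA, PySem.List.foldl_append_if (p := fun (i : Nat) => (d.get? (i : Int)).isSome)
      (f := fun (i : Nat) => (d.get? (i : Int)).getD 0)]
  have hB : combine_preds_alt X y_preds_1 idxs_1 y_preds_0 idxs_0
      = (PySem.List.sorted ((PySem.Dict.keys d).filter (fun k => decide (0 ≤ k ∧ k < (X.length : Int)))) (fun k => k) false).map
          (fun k => PySem.Dict.getD d k 0) := by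
    rw [hd]; rfl
  rw [hB, hkeys, List.map_map, List.nil_append]
  have hfil : (List.range X.length).filter (fun (i : Nat) => d.contains (i : Int))
      = (List.range X.length).filter (fun (i : Nat) => (d.get? (i : Int)).isSome) :=
    List.filter_congr (fun i _ => by rw [PySem.Dict.contains_eq_isSome_get?])
  rw [hfil]
  apply List.map_congr_left
  intro i hi
  simp [Function.comp, PySem.Dict.getD_eq_get?_getD]

-- ===== VERDICT (by name: the statement is the Claim_ definition above) =====
theorem combine_preds_spec : Claim_equal_combine_preds := by
  intro X y1 i1 y0 i0 _ hpre
  unfold Spec_combine_preds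
  exact combine_preds_spec_aux X y1 i1 y0 i0 hpre
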